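-- pv_equiv track=rewrite | github.com/Sylvester107/UNO-AI-Algorithm | Transitions.py | _remove_card
-- ===== SOURCE A (Python) =====
-- from typing import Optional, Tuple
--
-- def _remove_card(hand: Tuple[str, ...], card: str) -> Tuple[str, ...]:
--     """Return a new tuple with one instance of `card` removed."""
--     removed = False
--     updated = []
--     for c in hand:
--         if not removed and c == card:
--             removed = True
--             continue
--         updated.append(c)
--     if not removed:
--         raise ValueError(f"Card {card} not found in hand")
--     return tuple(updated)
-- ===== SOURCE B (Python) =====
-- def _remove_card(hand, card):
--     """Return a new tuple with one instance of `card` removed."""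
--     try:
--         i = hand.index(card)
--     except ValueError:
--         raise ValueError(f"Card {card} not found in hand")
--     return hand[:i] + hand[i+1:]
-- ===== Notes on version B (the rewrite author's own statement) =====
-- stated objective: simpler
-- what changed: Replaces the flag-and-rebuild loop with a single position lookup and slice concatenation hand[:i] + hand[i+1:], preserving the custom ValueError message.
import Mathlib
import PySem

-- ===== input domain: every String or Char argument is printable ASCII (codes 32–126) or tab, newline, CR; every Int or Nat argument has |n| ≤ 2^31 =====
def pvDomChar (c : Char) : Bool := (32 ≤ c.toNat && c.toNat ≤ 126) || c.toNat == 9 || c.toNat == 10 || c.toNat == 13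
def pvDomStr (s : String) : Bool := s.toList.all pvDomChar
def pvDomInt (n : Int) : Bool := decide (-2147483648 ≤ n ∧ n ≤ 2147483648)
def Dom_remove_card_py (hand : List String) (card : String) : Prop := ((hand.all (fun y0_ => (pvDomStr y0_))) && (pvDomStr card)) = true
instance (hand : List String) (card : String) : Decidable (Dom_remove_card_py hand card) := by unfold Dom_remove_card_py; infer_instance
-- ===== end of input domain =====

-- B removes the card by one index lookup and slice concatenation instead of a flag-and-rebuild loop (objective: simpler).
-- ===== PORT A =====
def remove_card_py (hand : List String) (card : String) : List String :=
  (hand.foldl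
    (fun (s : Bool × List String) c =>
      if !s.1 && c == card then (true, s.2) else (s.1, s.2 ++ [c]))
    (false, [])).2
  -- the final 'if not removed: raise ValueError' is excluded by Pre_remove_card_py

-- ===== PORT B =====
def remove_card_py_alt (hand : List String) (card : String) : List String :=
  match PySem.List.index? hand card with
  | some i => PySem.List.slice hand none (some (i : Int)) ++ PySem.List.slice hand (some ((i : Int) + 1)) none
  | none => []   -- hand.index raised ValueError: B re-raises (excluded by Pre_)

-- ===== PRECONDITION & SPEC =====
-- A raises ValueError when card is not in hand; exactly those inputs are excluded.
def Pre_remove_card_py (hand : List String) (card : String) : Prop := card ∈ hand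
instance (hand : List String) (card : String) : Decidable (Pre_remove_card_py hand card) := by unfold Pre_remove_card_py; infer_instance
def pvWitness_remove_card_py : List String × String := (["r3", "b7", "r3"], "r3")

def Spec_remove_card_py (hand : List String) (card : String) (out : List String) : Prop := out = remove_card_py_alt hand card
instance (hand : List String) (card : String) (out : List String) : Decidable (Spec_remove_card_py hand card out) := by unfold Spec_remove_card_py; infer_instance

-- ===== CLAIM (what is proved, stated in full; the proofs are below) =====
def Claim_equal_remove_card_py : Prop := ∀ (hand : List String) (card : String), Dom_remove_card_py hand card → Pre_remove_card_py hand card → Spec_remove_card_py hand card (remove_card_py hand card)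

-- ===== LEMMAS AND PROOFS =====

-- once removed, A's loop just appends every remaining element
theorem pvA_true (card : String) (t : List String) (u : List String) :
    List.foldl
      (fun (s : Bool × List String) c =>
        if !s.1 && c == card then (true, s.2) else (s.1, s.2 ++ [c]))
      (true, u) t = (true, u ++ t) := by
  induction t generalizing u with
  | nil => simp
  | cons c t ih =>
    simp only [List.foldl_cons]
    rw [if_neg (by simp)]
    rw [ih]
    simp

-- characterisation of A's loop while the card has not been removed yet
theorem pvA_false (card : String) (t : List String) (u : List String) :
    List.foldl
      (fun (s : Bool × List String) c =>
        if !s.1 && c == card then (true, s.2) else (s.1, s.2 ++ [c]))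
      (false, u) t =
      match PySem.List.index? t card with
      | some k => (true, u ++ t.take k ++ t.drop (k + 1))
      | none => (false, u ++ t) := by
  induction t generalizing u with
  | nil => simp [PySem.List.index?_eq_idxOf?]
  | cons c t ih =>
    by_cases hc : c = card
    · subst hc
      simp only [List.foldl_cons]
      rw [if_pos (by simp), pvA_true, PySem.List.index?_cons_self]
      simp
    · simp only [List.foldl_cons]
      rw [if_neg (by simp [hc]), ih, PySem.List.index?_cons_of_ne _ hc]
      cases PySem.List.index? t card <;> simp

-- ===== VERDICT (by name: the statement is the Claim_ definition above) =====
theorem remove_card_py_spec : Claim_equal_remove_card_py := by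
  intro hand card _ hpre
  have hm : card ∈ hand := hpre
  unfold Spec_remove_card_py remove_card_py remove_card_py_alt
  rw [pvA_false]
  cases h : PySem.List.index? hand card with
  | none => exact absurd hm (by rwa [PySem.List.index?_eq_none_iff] at h)
  | some i =>
    have h1 : ((i : Int) + 1) = ((i + 1 : Nat) : Int) := by push_cast; ring
    simp only [h1, PySem.List.slice_to_natCast, PySem.List.slice_from_natCast]
    simp
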